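-- pv_equiv track=rewrite | github.com/Stoggles/AdventofCode | 2025/day04.py | part1
-- ===== SOURCE A (Python) =====
-- def part1(grid: dict[(int, int), int]) -> int:
--     rolls = 0
--
--     for key in grid.keys():
--         adjacent_count = 0
--         for x in range(-1, 2, 1):
--             for y in range(-1, 2, 1):
--                 if x == 0 and y == 0:
--                     continue
--                 adjacent_count += grid.get((key[0] + x, key[1] + y)) or 0
--         rolls += 1 if adjacent_count < 4 else 0
--
--     return rolls
-- ===== SOURCE B (Python) =====
-- OFFSETS = [(-1, -1), (-1, 0), (-1, 1), (0, -1), (0, 1), (1, -1), (1, 0), (1, 1)]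
--
--
-- def part1(grid: dict[(int, int), int]) -> int:
--     # Scatter: push every cell's value onto its 8 neighbours once,
--     # then count the cells whose accumulated neighbour sum is below 4.
--     neigh = {}
--     for (kx, ky), v in grid.items():
--         for dx, dy in OFFSETS:
--             nk = (kx + dx, ky + dy)
--             neigh[nk] = neigh.get(nk, 0) + v
--     return sum(1 for key in grid if neigh.get(key, 0) < 4)
-- ===== Notes on version B (the rewrite author's own statement) =====
-- stated objective: alternative
-- what changed: Replaces A's per-cell gather (8 dict lookups around every key via two nested range(-1,2) loops) by a scatter pass that adds each cell's value into an accumulator dict at its 8 neighbour keys once, then counts grid keys whose accumulated sum is below 4.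
import Mathlib
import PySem

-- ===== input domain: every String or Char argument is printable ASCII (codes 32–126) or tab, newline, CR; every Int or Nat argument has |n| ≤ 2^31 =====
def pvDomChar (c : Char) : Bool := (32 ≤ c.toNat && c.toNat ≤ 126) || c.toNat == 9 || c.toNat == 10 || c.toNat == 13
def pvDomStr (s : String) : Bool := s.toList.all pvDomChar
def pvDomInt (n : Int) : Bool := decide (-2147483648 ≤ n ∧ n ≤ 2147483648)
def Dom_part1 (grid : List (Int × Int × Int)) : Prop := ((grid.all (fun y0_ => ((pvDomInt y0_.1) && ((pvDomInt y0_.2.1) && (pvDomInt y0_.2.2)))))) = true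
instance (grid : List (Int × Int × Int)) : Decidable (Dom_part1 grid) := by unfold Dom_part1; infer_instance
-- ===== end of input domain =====

-- B replaces A's per-cell gather of the 8 neighbour values by a scatter pass that adds each
-- cell's value into an accumulator dict at its 8 neighbour keys, then counts; alternative
-- decomposition, same asymptotic cost.

-- ===== PORT A =====
-- marshalling of the dict parameter: the association list as a Python dict
-- (a later duplicate key overwrites, keeping the first position)
def pyDictOfGrid (grid : List (Int × Int × Int)) : PySem.Dict (Int × Int) Int :=
  PySem.Dict.ofList (grid.map (fun t => ((t.1, t.2.1), t.2.2)))

-- `grid.get(...) or 0` is ported exactly as `(get? …).getD 0`: the values are ints and `0 or 0 == 0`.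
def part1 (grid : List (Int × Int × Int)) : Int :=
  let g := pyDictOfGrid grid
  g.keys.foldl
    (fun rolls key =>
      let adjacent_count :=
        (PySem.List.pyRange (-1) 2 1).foldl (fun ac x =>
          (PySem.List.pyRange (-1) 2 1).foldl (fun ac y =>
            if x = 0 ∧ y = 0 then ac
            else ac + ((g.get? (key.1 + x, key.2 + y)).getD 0)) ac) 0
      rolls + (if adjacent_count < 4 then 1 else 0)) 0

-- ===== PORT B =====
def OFFSETS : List (Int × Int) :=
  [(-1, -1), (-1, 0), (-1, 1), (0, -1), (0, 1), (1, -1), (1, 0), (1, 1)]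

def part1_alt (grid : List (Int × Int × Int)) : Int :=
  let g := pyDictOfGrid grid
  let neigh : PySem.Dict (Int × Int) Int :=
    g.items.foldl (fun nb p =>
      OFFSETS.foldl (fun nb o =>
        nb.insert (p.1.1 + o.1, p.1.2 + o.2) (nb.getD (p.1.1 + o.1, p.1.2 + o.2) 0 + p.2)) nb)
      PySem.Dict.empty
  g.keys.foldl (fun c key => c + (if neigh.getD key 0 < 4 then 1 else 0)) 0

-- ===== PRECONDITION & SPEC =====
def Spec_part1 (grid : List (Int × Int × Int)) (out : Int) : Prop := out = part1_alt grid
instance (grid : List (Int × Int × Int)) (out : Int) : Decidable (Spec_part1 grid out) := by unfold Spec_part1; infer_instance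

-- ===== CLAIM (what is proved, stated in full; the proofs are below) =====
def Claim_equal_part1 : Prop := ∀ (grid : List (Int × Int × Int)), Dom_part1 grid → Spec_part1 grid (part1 grid)

-- ===== LEMMAS AND PROOFS =====

-- "sum of the values whose key is j" over a raw item list
def Fsum (l : List ((Int × Int) × Int)) (j : Int × Int) : Int :=
  (l.map (fun p => if p.1 = j then p.2 else 0)).sum

lemma exch {α β : Type} (l : List α) (m : List β) (f : α → β → Int) :
    (l.map (fun x => (m.map (f x)).sum)).sum
      = (m.map (fun y => (l.map (fun x => f x y)).sum)).sum := by
  induction l with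
  | nil => simp
  | cons a l ih => simp [ih]

lemma Fsum_eq_zero (l : List ((Int × Int) × Int)) (j : Int × Int)
    (h : j ∉ l.map Prod.fst) : Fsum l j = 0 := by
  induction l with
  | nil => rfl
  | cons p l ih =>
    simp only [List.map_cons, List.mem_cons, not_or] at h
    have h1 : ¬ p.1 = j := fun hh => h.1 hh.symm
    simp only [Fsum, List.map_cons, List.sum_cons, if_neg h1, zero_add]
    exact ih h.2

lemma getD_mk (l : List ((Int × Int) × Int)) (hn : (l.map Prod.fst).Nodup) (k : Int × Int) :
    ((PySem.Dict.mk l).get? k).getD 0 = Fsum l k := by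
  induction l with
  | nil => rfl
  | cons p l ih =>
    obtain ⟨j, v⟩ := p
    rw [PySem.Dict.get?_mk_cons]
    simp only [List.map_cons, List.nodup_cons] at hn
    by_cases h : j = k
    · subst h
      have hz : Fsum l j = 0 := Fsum_eq_zero l j hn.1
      simp only [Fsum, List.map_cons, List.sum_cons] at hz ⊢
      simp [hz]
    · have : (j == k) = false := by simp [h]
      simp only [this, Bool.false_eq_true, if_false]
      rw [ih hn.2]
      simp [Fsum, h]

lemma lookup_eq_Fsum (g : PySem.Dict (Int × Int) Int) (hn : g.keys.Nodup) (k : Int × Int) :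
    (g.get? k).getD 0 = Fsum g.items k := by
  have : g = PySem.Dict.mk g.items := PySem.Dict.ext rfl
  rw [this]
  exact getD_mk g.items hn k

lemma scatter_getD (l : List ((Int × Int) × Int)) (d : PySem.Dict (Int × Int) Int) (k : Int × Int) :
    (l.foldl (fun nb p => nb.insert p.1 (nb.getD p.1 0 + p.2)) d).getD k 0
      = d.getD k 0 + Fsum l k := by
  induction l generalizing d with
  | nil => simp [Fsum]
  | cons p l ih =>
    rw [List.foldl_cons, ih]
    rw [PySem.Dict.getD_insert]
    by_cases h : k = p.1
    · simp [Fsum, h]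
      ring
    · have h' : ¬ p.1 = k := fun hh => h hh.symm
      simp [Fsum, h, h']

lemma foldl_flat {α β γ : Type} (l : List α) (m : α → List β) (step : γ → β → γ) (init : γ) :
    l.foldl (fun s a => (m a).foldl step s) init = (l.flatMap m).foldl step init := by
  induction l generalizing init with
  | nil => rfl
  | cons a l ih => simp [List.flatMap_cons, List.foldl_append, ih]

lemma Fsum_append (l₁ l₂ : List ((Int × Int) × Int)) (k : Int × Int) :
    Fsum (l₁ ++ l₂) k = Fsum l₁ k + Fsum l₂ k := by
  simp [Fsum]

lemma Fsum_flatMap {α : Type} (l : List α) (m : α → List ((Int × Int) × Int)) (k : Int × Int) :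
    Fsum (l.flatMap m) k = (l.map (fun a => Fsum (m a) k)).sum := by
  induction l with
  | nil => rfl
  | cons a l ih => simp [List.flatMap_cons, Fsum_append, ih]

lemma sum_ite_eq_count_right (l : List (Int × Int)) (a b k1 k2 v : Int) :
    (l.map (fun o => if ((a + o.1, b + o.2) : Int × Int) = (k1, k2) then v else 0)).sum
      = (l.count (k1 - a, k2 - b) : Int) * v := by
  induction l with
  | nil => simp
  | cons o l ih =>
    rw [List.map_cons, List.sum_cons, ih, List.count_cons]
    by_cases h : ((a + o.1, b + o.2) : Int × Int) = (k1, k2)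
    · have h2 : ((k1 - a, k2 - b) : Int × Int) = o := by
        obtain ⟨o1, o2⟩ := o
        simp [Prod.ext_iff] at h ⊢
        omega
      simp [h, h2]
      ring
    · have h2 : ¬ ((k1 - a, k2 - b) : Int × Int) = o := by
        obtain ⟨o1, o2⟩ := o
        simp [Prod.ext_iff] at h ⊢
        omega
      have h2' : ¬ o = ((k1 - a, k2 - b) : Int × Int) := fun hh => h2 hh.symm
      simp [h, h2']

lemma sum_ite_eq_count_left (l : List (Int × Int)) (a b k1 k2 v : Int) :
    (l.map (fun o => if ((a, b) : Int × Int) = (k1 + o.1, k2 + o.2) then v else 0)).sum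
      = (l.count (a - k1, b - k2) : Int) * v := by
  induction l with
  | nil => simp
  | cons o l ih =>
    rw [List.map_cons, List.sum_cons, ih, List.count_cons]
    by_cases h : ((a, b) : Int × Int) = (k1 + o.1, k2 + o.2)
    · have h2 : ((a - k1, b - k2) : Int × Int) = o := by
        obtain ⟨o1, o2⟩ := o
        simp [Prod.ext_iff] at h ⊢
        omega
      simp [h, h2]
      ring
    · have h2 : ¬ ((a - k1, b - k2) : Int × Int) = o := by
        obtain ⟨o1, o2⟩ := o
        simp [Prod.ext_iff] at h ⊢
        omega
      have h2' : ¬ o = ((a - k1, b - k2) : Int × Int) := fun hh => h2 hh.symm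
      simp [h, h2']

lemma off_count_neg (c d : Int) : OFFSETS.count (c, d) = OFFSETS.count (-c, -d) := by
  have hinj : Function.Injective (fun p : Int × Int => ((-p.1, -p.2) : Int × Int)) := by
    intro ⟨x1, x2⟩ ⟨y1, y2⟩ h
    simp [Prod.ext_iff] at h ⊢
    omega
  have hperm : (OFFSETS.map (fun p : Int × Int => ((-p.1, -p.2) : Int × Int))).Perm OFFSETS := by
    decide
  calc OFFSETS.count (c, d)
      = (OFFSETS.map (fun p : Int × Int => ((-p.1, -p.2) : Int × Int))).count
          ((fun p : Int × Int => ((-p.1, -p.2) : Int × Int)) (c, d)) :=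
        (List.count_map_of_injective _ _ hinj _).symm
    _ = OFFSETS.count (-c, -d) := hperm.count_eq _

lemma mainPoint (a b v k1 k2 : Int) :
    (OFFSETS.map (fun o => if ((a + o.1, b + o.2) : Int × Int) = (k1, k2) then v else 0)).sum
      = (OFFSETS.map (fun o => if ((a, b) : Int × Int) = (k1 + o.1, k2 + o.2) then v else 0)).sum := by
  rw [sum_ite_eq_count_right, sum_ite_eq_count_left]
  have h : ((k1 - a, k2 - b) : Int × Int) = (-(a - k1), -(b - k2)) := by
    simp
  rw [h, ← off_count_neg]

lemma key_eq (g : PySem.Dict (Int × Int) Int) (hn : g.keys.Nodup) (key : Int × Int) :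
    ((PySem.List.pyRange (-1) 2 1).foldl (fun ac x =>
        (PySem.List.pyRange (-1) 2 1).foldl (fun ac y =>
          if x = 0 ∧ y = 0 then ac
          else ac + ((g.get? (key.1 + x, key.2 + y)).getD 0)) ac) 0)
      = (g.items.foldl (fun nb p =>
          OFFSETS.foldl (fun nb o =>
            nb.insert (p.1.1 + o.1, p.1.2 + o.2)
              (nb.getD (p.1.1 + o.1, p.1.2 + o.2) 0 + p.2)) nb)
          PySem.Dict.empty).getD key 0 := by
  -- right side: flatten the nested scatter loop, then characterise the accumulated value
  have hinner : ∀ (nb : PySem.Dict (Int × Int) Int) (p : (Int × Int) × Int),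
      OFFSETS.foldl (fun nb o =>
        nb.insert (p.1.1 + o.1, p.1.2 + o.2)
          (nb.getD (p.1.1 + o.1, p.1.2 + o.2) 0 + p.2)) nb
      = (OFFSETS.map (fun o => (((p.1.1 + o.1, p.1.2 + o.2) : Int × Int), p.2))).foldl
          (fun nb q => nb.insert q.1 (nb.getD q.1 0 + q.2)) nb := by
    intro nb p
    rw [List.foldl_map]
  have hR : PySem.List.pyRange (-1) 2 1 = [-1, 0, 1] := by decide
  have hrhs :
      (g.items.foldl (fun nb p =>
          OFFSETS.foldl (fun nb o =>
            nb.insert (p.1.1 + o.1, p.1.2 + o.2)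
              (nb.getD (p.1.1 + o.1, p.1.2 + o.2) 0 + p.2)) nb)
          PySem.Dict.empty).getD key 0
      = (g.items.map (fun p =>
          (OFFSETS.map (fun o =>
            if (((p.1.1 + o.1, p.1.2 + o.2) : Int × Int)) = key then p.2 else 0)).sum)).sum := by
    have hfun : (fun (nb : PySem.Dict (Int × Int) Int) (p : (Int × Int) × Int) =>
        OFFSETS.foldl (fun nb o =>
          nb.insert (p.1.1 + o.1, p.1.2 + o.2)
            (nb.getD (p.1.1 + o.1, p.1.2 + o.2) 0 + p.2)) nb)
      = (fun (nb : PySem.Dict (Int × Int) Int) (p : (Int × Int) × Int) =>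
          (OFFSETS.map (fun o => (((p.1.1 + o.1, p.1.2 + o.2) : Int × Int), p.2))).foldl
            (fun nb q => nb.insert q.1 (nb.getD q.1 0 + q.2)) nb) :=
      funext fun nb => funext fun p => hinner nb p
    rw [hfun, foldl_flat, scatter_getD, PySem.Dict.getD_empty, Fsum_flatMap]
    simp only [zero_add]
    congr 1
  rw [hrhs]
  -- left side: expand the two range loops into the 8 explicit lookups
  rw [hR]
  simp only [List.foldl_cons, List.foldl_nil]
  norm_num
  -- now rewrite each lookup as a sum over the items, exchange the two sums, and compare pointwise
  obtain ⟨k1, k2⟩ := key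
  have hl : ∀ j : Int × Int, (g.get? j).getD 0 = Fsum g.items j := lookup_eq_Fsum g hn
  rw [hl, hl, hl, hl, hl, hl, hl, hl]
  have hgoal :
      (OFFSETS.map (fun o => Fsum g.items (k1 + o.1, k2 + o.2))).sum
      = (g.items.map (fun p =>
          (OFFSETS.map (fun o =>
            if (((p.1.1 + o.1, p.1.2 + o.2) : Int × Int)) = (k1, k2) then p.2 else 0)).sum)).sum := by
    have hx : ∀ p : (Int × Int) × Int,
        (OFFSETS.map (fun o =>
            if (((p.1.1 + o.1, p.1.2 + o.2) : Int × Int)) = (k1, k2) then p.2 else 0)).sum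
        = (OFFSETS.map (fun o =>
            if ((p.1.1, p.1.2) : Int × Int) = (k1 + o.1, k2 + o.2) then p.2 else 0)).sum := by
      intro p
      exact mainPoint p.1.1 p.1.2 p.2 k1 k2
    calc (OFFSETS.map (fun o => Fsum g.items (k1 + o.1, k2 + o.2))).sum
        = (OFFSETS.map (fun o => (g.items.map (fun p =>
            if p.1 = ((k1 + o.1, k2 + o.2) : Int × Int) then p.2 else 0)).sum)).sum := rfl
      _ = (g.items.map (fun p => (OFFSETS.map (fun o =>
            if p.1 = ((k1 + o.1, k2 + o.2) : Int × Int) then p.2 else 0)).sum)).sum := by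
          rw [← exch]
      _ = (g.items.map (fun p =>
            (OFFSETS.map (fun o =>
              if (((p.1.1 + o.1, p.1.2 + o.2) : Int × Int)) = (k1, k2) then p.2 else 0)).sum)).sum := by
          apply congrArg
          apply List.map_congr_left
          intro p _
          rw [← hx p]
  rw [← hgoal]
  simp [OFFSETS]
  ring

theorem part1_spec : Claim_equal_part1 := by
  intro grid _
  unfold Spec_part1
  simp only [part1, part1_alt]
  have hn : (pyDictOfGrid grid).keys.Nodup := by
    unfold pyDictOfGrid
    exact PySem.Dict.nodup_keys_ofList _
  congr 1
  funext rolls key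
  rw [key_eq (pyDictOfGrid grid) hn key]
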